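-- pv_equiv track=rewrite | github.com/jms7446/hackerrank | baekjoon/gold/p1328.py | solve3
-- ===== SOURCE A (Python) =====
-- MOD = 1000000007
--
-- def solve3(N, L, R):
--     if L > R:
--         L, R = R, L
--     dp = [[[-1] * (R + 1) for _ in range(L + 1)] for _ in range(N + 1)]
--     dp[1][1][1] = 1
--
--     def loop(n, l, r):
--         if l <= 0 or r <= 0 or n <= 0:
--             return 0
--         if dp[n][l][r] >= 0:
--             return dp[n][l][r]
--
--         if l == r:
--             res = loop(n - 1, l, r) * (n - 2) + loop(n - 1, l - 1, r) * 2
--         else: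
--             res = loop(n - 1, l, r) * (n - 2) + loop(n - 1, l - 1, r) + loop(n - 1, l, r - 1)
--         res %= MOD
--         dp[n][l][r] = res
--         return res
--     return loop(N, L, R)
-- ===== SOURCE B (Python) =====
-- MOD = 1000000007
--
-- def solve3(N, L, R):
--     # answer = C(L+R-2, L-1) * c(N-1, L+R-2) mod MOD, c = unsigned Stirling 1st kind
--     k = L + R - 2
--     if k > N - 1:
--         return 0                   # c(N-1, k) = 0 above the diagonal
--     row = [1] + [0] * k            # row[j] = c(0, j)
--     for m in range(1, N):          # row[j] = c(m, j)
--         row = [0] + [(p + (m - 1) * x) % MOD for p, x in zip(row, row[1:])]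
--     c = 1
--     t = min(L - 1, R - 1)
--     for i in range(t):
--         c = c * (k - i) // (i + 1)
--     return c % MOD * row[k] % MOD
-- ===== Notes on version B (the rewrite author's own statement) =====
-- stated objective: faster
-- what changed: Replaces A's memoized three-parameter recursion over (n,l,r) with the closed form C(L+R-2, L-1) * c(N-1, L+R-2) mod 1e9+7, computing one rolling row of unsigned Stirling numbers of the first kind and the binomial coefficient by a short product loop.
-- outside the precondition, e.g. on solve3(0, 1, 1): A raises IndexError, B returns 0; on solve3(3, 0, 2): A raises IndexError, B returns 0
import Mathlib
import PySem

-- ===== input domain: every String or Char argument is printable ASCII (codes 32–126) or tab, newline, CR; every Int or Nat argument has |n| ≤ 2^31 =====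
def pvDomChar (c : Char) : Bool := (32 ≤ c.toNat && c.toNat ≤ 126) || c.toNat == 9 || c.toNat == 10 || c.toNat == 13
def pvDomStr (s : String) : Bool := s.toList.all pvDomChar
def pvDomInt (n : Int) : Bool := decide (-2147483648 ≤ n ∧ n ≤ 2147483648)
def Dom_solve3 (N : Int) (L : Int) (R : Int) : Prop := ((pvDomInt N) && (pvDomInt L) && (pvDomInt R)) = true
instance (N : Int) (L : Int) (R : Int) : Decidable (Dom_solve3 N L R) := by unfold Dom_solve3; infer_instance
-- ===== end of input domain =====

-- B replaces A's memoized 3-parameter recursion by the closed form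
-- C(L+R-2, L-1) * c(N-1, L+R-2) (unsigned Stirling numbers of the first kind,
-- one rolling row), mod 10^9+7; objective: faster (O(N·(L+R)) vs O(N·L·R)).

def pvMOD : Int := 1000000007

-- ===== PORT A =====
-- A's dp is a 3D list initialised to -1; it is ported as the same nested list with
-- functional update.  All dp indices A ever uses are nonnegative and in range
-- (n ≤ N, l ≤ L, r ≤ R after the swap), so .toNat/getD/set indexing is exact there.
def pvRead3 (dp : List (List (List Int))) (n l r : Int) : Int :=
  ((dp.getD n.toNat []).getD l.toNat []).getD r.toNat (-1)

def pvWrite3 (dp : List (List (List Int))) (n l r v : Int) : List (List (List Int)) :=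
  dp.set n.toNat ((dp.getD n.toNat []).set l.toNat
    (((dp.getD n.toNat []).getD l.toNat []).set r.toNat v))

def solve3Loop : Nat → Int → Int → Int → List (List (List Int)) →
    Int × List (List (List Int))
  | fuel, n, l, r, dp =>
    if l ≤ 0 ∨ r ≤ 0 ∨ n ≤ 0 then (0, dp)
    else if 0 ≤ pvRead3 dp n l r then (pvRead3 dp n l r, dp)
    else match fuel with
    | 0 => (0, dp)  -- unreachable when fuel ≥ n: the n ≤ 0 guard fires first
    | fuel + 1 =>
      if l = r then
        match solve3Loop fuel (n - 1) l r dp with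
        | (a, dp1) =>
          match solve3Loop fuel (n - 1) (l - 1) r dp1 with
          | (b, dp2) =>
            (PySem.Int.mod (a * (n - 2) + b * 2) pvMOD,
             pvWrite3 dp2 n l r (PySem.Int.mod (a * (n - 2) + b * 2) pvMOD))
      else
        match solve3Loop fuel (n - 1) l r dp with
        | (a, dp1) =>
          match solve3Loop fuel (n - 1) (l - 1) r dp1 with
          | (b, dp2) =>
            match solve3Loop fuel (n - 1) l (r - 1) dp2 with
            | (c, dp3) =>
              (PySem.Int.mod (a * (n - 2) + b + c) pvMOD,
               pvWrite3 dp3 n l r (PySem.Int.mod (a * (n - 2) + b + c) pvMOD))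

def solve3 (N : Int) (L : Int) (R : Int) : Int :=
  let LR := if L > R then (R, L) else (L, R)
  let dp0 := List.replicate (N+1).toNat
    (List.replicate (LR.1+1).toNat (List.replicate (LR.2+1).toNat (-1 : Int)))
  (solve3Loop (N.toNat + 1) N LR.1 LR.2 (pvWrite3 dp0 1 1 1 1)).1

-- ===== PORT B =====
def solve3_alt (N : Int) (L : Int) (R : Int) : Int :=
  let k := L + R - 2
  if k > N - 1 then 0
  else
    let row0 : List Int := 1 :: List.replicate k.toNat 0
    let row := (PySem.List.pyRange 1 N 1).foldl
      (fun row m => (0:Int) ::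
        List.zipWith (fun p x => PySem.Int.mod (p + (m - 1) * x) pvMOD) row row.tail) row0
    let t := min (L - 1) (R - 1)
    let c := (PySem.List.pyRange 0 t 1).foldl
      (fun c i => PySem.Int.floordiv (c * (k - i)) (i + 1)) 1
    PySem.Int.mod (PySem.Int.mod c pvMOD * PySem.List.pyGetD row k 0) pvMOD

-- ===== PRECONDITION & SPEC =====
-- Pre_ excludes exactly the inputs on which A raises (IndexError while building or
-- seeding the dp table when N < 1, L < 1 or R < 1); A returns normally on all others.
def Pre_solve3 (N : Int) (L : Int) (R : Int) : Prop := 1 ≤ N ∧ 1 ≤ L ∧ 1 ≤ R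
instance (N : Int) (L : Int) (R : Int) : Decidable (Pre_solve3 N L R) := by
  unfold Pre_solve3; infer_instance
def pvWitness_solve3 : Int × Int × Int := (4, 2, 2)

def Spec_solve3 (N : Int) (L : Int) (R : Int) (out : Int) : Prop := out = solve3_alt N L R
instance (N : Int) (L : Int) (R : Int) (out : Int) : Decidable (Spec_solve3 N L R out) := by
  unfold Spec_solve3; infer_instance

-- ===== CLAIM (what is proved, stated in full; the proofs are below) =====
def Claim_equal_solve3 : Prop := ∀ (N : Int) (L : Int) (R : Int),
  Dom_solve3 N L R → Pre_solve3 N L R → Spec_solve3 N L R (solve3 N L R)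

-- ===== LEMMAS AND PROOFS =====

def pvStir : Nat → Nat → Nat
  | 0, 0 => 1
  | 0, _ + 1 => 0
  | _ + 1, 0 => 0
  | m + 1, k + 1 => pvStir m k + m * pvStir m (k + 1)

def pvG (n l r : Int) : Int :=
  if n ≤ 0 ∨ l ≤ 0 ∨ r ≤ 0 then 0
  else ((Nat.choose (l + r - 2).toNat (l - 1).toNat *
         pvStir (n - 1).toNat (l + r - 2).toNat : Nat) : Int) % pvMOD

def pvF (n l r : Int) : Int :=
  if h : n ≤ 0 ∨ l ≤ 0 ∨ r ≤ 0 then 0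
  else if n = 1 ∧ l = 1 ∧ r = 1 then 1
  else if l = r then
    PySem.Int.mod (pvF (n - 1) l r * (n - 2) + pvF (n - 1) (l - 1) r * 2) pvMOD
  else
    PySem.Int.mod (pvF (n - 1) l r * (n - 2) + pvF (n - 1) (l - 1) r +
      pvF (n - 1) l (r - 1)) pvMOD
termination_by n.toNat
decreasing_by all_goals omega

def pvGood (dp : List (List (List Int))) : Prop :=
  pvRead3 dp 1 1 1 = 1 ∧
  ∀ n l r : Int, 0 ≤ pvRead3 dp n l r → pvRead3 dp n l r = pvF n l r

theorem pvF_guard (n l r : Int) (h : n ≤ 0 ∨ l ≤ 0 ∨ r ≤ 0) : pvF n l r = 0 := by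
  rw [pvF]; simp [h]

theorem pvGetDSet {α : Type} (xs : List α) (i j : Nat) (x d : α) :
    (xs.set i x).getD j d = if i = j ∧ i < xs.length then x else xs.getD j d := by
  by_cases h : i = j
  · subst h
    by_cases hl : i < xs.length
    · rw [if_pos ⟨rfl, hl⟩]
      simp [List.getD_eq_getElem?_getD, hl]
    · rw [if_neg (by tauto)]
      have h1 : (xs.set i x)[i]? = none := List.getElem?_eq_none (by simp; omega)
      have h2 : xs[i]? = none := List.getElem?_eq_none (by omega)
      rw [List.getD_eq_getElem?_getD, List.getD_eq_getElem?_getD, h1, h2]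
  · rw [if_neg (by tauto)]
    rw [List.getD_eq_getElem?_getD, List.getD_eq_getElem?_getD, List.getElem?_set, if_neg h]

theorem pvRead3_write (dp : List (List (List Int))) (n l r v n' l' r' : Int) :
    pvRead3 (pvWrite3 dp n l r v) n' l' r' = pvRead3 dp n' l' r' ∨
    (n'.toNat = n.toNat ∧ l'.toNat = l.toNat ∧ r'.toNat = r.toNat ∧
     pvRead3 (pvWrite3 dp n l r v) n' l' r' = v) := by
  unfold pvRead3 pvWrite3
  rw [pvGetDSet]
  by_cases h1 : n.toNat = n'.toNat ∧ n.toNat < dp.length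
  · rw [if_pos h1, pvGetDSet]
    have hdp : dp.getD n'.toNat [] = dp.getD n.toNat [] := by rw [h1.1]
    rw [hdp]
    by_cases h2 : l.toNat = l'.toNat ∧ l.toNat < (dp.getD n.toNat []).length
    · rw [if_pos h2, pvGetDSet]
      have hrow : (dp.getD n.toNat []).getD l'.toNat [] = (dp.getD n.toNat []).getD l.toNat [] := by
        rw [h2.1]
      rw [hrow]
      by_cases h3 : r.toNat = r'.toNat ∧ r.toNat < ((dp.getD n.toNat []).getD l.toNat []).length
      · rw [if_pos h3]
        right
        exact ⟨h1.1.symm, h2.1.symm, h3.1.symm, rfl⟩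
      · rw [if_neg h3]
        left; rfl
    · rw [if_neg h2]
      left; rfl
  · rw [if_neg h1]
    left; rfl

theorem pvGood_write (dp : List (List (List Int))) (hG : pvGood dp)
    (n l r v : Int) (hn : 1 ≤ n) (hl : 1 ≤ l) (hr : 1 ≤ r)
    (hne : ¬(n = 1 ∧ l = 1 ∧ r = 1)) (hv : v = pvF n l r) :
    pvGood (pvWrite3 dp n l r v) := by
  constructor
  · rcases pvRead3_write dp n l r v 1 1 1 with h | ⟨e1, e2, e3, _⟩
    · rw [h]; exact hG.1
    · exact absurd ⟨by omega, by omega, by omega⟩ hne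
  · intro n' l' r' hge
    rcases pvRead3_write dp n l r v n' l' r' with h | ⟨e1, e2, e3, hval⟩
    · rw [h] at hge ⊢; exact hG.2 n' l' r' hge
    · have en : n' = n := by omega
      have el : l' = l := by omega
      have er : r' = r := by omega
      rw [hval, en, el, er, hv]

theorem pvLoop_correct : ∀ (fuel : Nat) (n l r : Int) dp, pvGood dp → n ≤ (fuel : Int) →
    (solve3Loop fuel n l r dp).1 = pvF n l r ∧ pvGood (solve3Loop fuel n l r dp).2 := by
  intro fuel
  induction fuel with
  | zero =>
    intro n l r dp hG hf
    have hn : n ≤ 0 := by exact_mod_cast hf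
    rw [solve3Loop, if_pos (by omega : l ≤ 0 ∨ r ≤ 0 ∨ n ≤ 0)]
    exact ⟨(pvF_guard n l r (by omega)).symm, hG⟩
  | succ fuel ih =>
    intro n l r dp hG hf
    rw [solve3Loop]
    by_cases hg : l ≤ 0 ∨ r ≤ 0 ∨ n ≤ 0
    · rw [if_pos hg]
      exact ⟨(pvF_guard n l r (by omega)).symm, hG⟩
    rw [if_neg hg]
    by_cases hm : 0 ≤ pvRead3 dp n l r
    · rw [if_pos hm]
      exact ⟨hG.2 n l r hm, hG⟩
    rw [if_neg hm]
    have hg' : ¬(n ≤ 0 ∨ l ≤ 0 ∨ r ≤ 0) := by omega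
    have hseed : ¬(n = 1 ∧ l = 1 ∧ r = 1) := by
      rintro ⟨rfl, rfl, rfl⟩
      rw [hG.1] at hm; exact hm (by norm_num)
    have hf' : n - 1 ≤ (fuel : Int) := by push_cast at hf ⊢; omega
    have hFrec : pvF n l r = if l = r then
        PySem.Int.mod (pvF (n - 1) l r * (n - 2) + pvF (n - 1) (l - 1) r * 2) pvMOD
      else PySem.Int.mod (pvF (n - 1) l r * (n - 2) + pvF (n - 1) (l - 1) r +
        pvF (n - 1) l (r - 1)) pvMOD := by
      rw [pvF, dif_neg hg', if_neg hseed]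
    by_cases hlr : l = r
    · rw [if_pos hlr]
      obtain ⟨hp1, hp2⟩ := ih (n - 1) l r dp hG hf'
      rcases h1 : solve3Loop fuel (n - 1) l r dp with ⟨a, dp1⟩
      rw [h1] at hp1 hp2
      obtain ⟨hq1, hq2⟩ := ih (n - 1) (l - 1) r dp1 hp2 hf'
      rcases h2 : solve3Loop fuel (n - 1) (l - 1) r dp1 with ⟨b, dp2⟩
      rw [h2] at hq1 hq2
      simp only [h2]
      dsimp only at hp1 hq1
      have hres : PySem.Int.mod (a * (n - 2) + b * 2) pvMOD = pvF n l r := by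
        rw [hp1, hq1, hFrec, if_pos hlr]
      exact ⟨hres, pvGood_write _ hq2 n l r _ (by omega) (by omega) (by omega) hseed hres⟩
    · rw [if_neg hlr]
      obtain ⟨hp1, hp2⟩ := ih (n - 1) l r dp hG hf'
      rcases h1 : solve3Loop fuel (n - 1) l r dp with ⟨a, dp1⟩
      rw [h1] at hp1 hp2
      obtain ⟨hq1, hq2⟩ := ih (n - 1) (l - 1) r dp1 hp2 hf'
      rcases h2 : solve3Loop fuel (n - 1) (l - 1) r dp1 with ⟨b, dp2⟩
      rw [h2] at hq1 hq2
      obtain ⟨hs1, hs2⟩ := ih (n - 1) l (r - 1) dp2 hq2 hf'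
      rcases h3 : solve3Loop fuel (n - 1) l (r - 1) dp2 with ⟨c, dp3⟩
      rw [h3] at hs1 hs2
      simp only [h2, h3]
      dsimp only at hp1 hq1 hs1
      have hres : PySem.Int.mod (a * (n - 2) + b + c) pvMOD = pvF n l r := by
        rw [hp1, hq1, hs1, hFrec, if_neg hlr]
      exact ⟨hres, pvGood_write _ hs2 n l r _ (by omega) (by omega) (by omega) hseed hres⟩

theorem pvMOD_pos : (0:Int) < pvMOD := by norm_num [pvMOD]

theorem pvmod_eq (x : Int) : PySem.Int.mod x pvMOD = x % pvMOD :=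
  PySem.Int.mod_eq_emod_of_pos pvMOD_pos

theorem pvmod_comb (w x x' y y' z z' : Int) (hx : x' ≡ x [ZMOD pvMOD])
    (hy : y' ≡ y [ZMOD pvMOD]) (hz : z' ≡ z [ZMOD pvMOD]) :
    (x' * w + y' + z') % pvMOD = (x * w + y + z) % pvMOD :=
  ((hx.mul_right w).add hy).add hz

theorem pvmod_self (x : Int) : (x % pvMOD) ≡ x [ZMOD pvMOD] :=
  Int.emod_emod_of_dvd x dvd_rfl

theorem pvId0b (m c : Nat) : Nat.choose (c+1) 0 * pvStir (m+1) (c+1)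
    = (Nat.choose (c+1) 0 * pvStir m (c+1)) * m + Nat.choose c 0 * pvStir m c := by
  simp [pvStir]; ring

theorem pvIda0 (m d : Nat) : Nat.choose (d+1) (d+1) * pvStir (m+1) (d+1)
    = (Nat.choose (d+1) (d+1) * pvStir m (d+1)) * m + Nat.choose d d * pvStir m d := by
  simp [pvStir]; ring

theorem pvIdab (m d c : Nat) : Nat.choose (d+c+2) (d+1) * pvStir (m+1) (d+c+2)
    = (Nat.choose (d+c+2) (d+1) * pvStir m (d+c+2)) * m
      + Nat.choose (d+c+1) d * pvStir m (d+c+1)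
      + Nat.choose (d+c+1) (d+1) * pvStir m (d+c+1) := by
  have h1 : d+c+2 = (d+c+1)+1 := rfl
  rw [h1, pvStir, Nat.choose_succ_succ (d+c+1) d]
  ring

theorem pvG_eval (n l r : Int) (hn : 1 ≤ n) (hl : 1 ≤ l) (hr : 1 ≤ r) :
    pvG n l r = ((Nat.choose (l+r-2).toNat (l-1).toNat *
      pvStir (n-1).toNat (l+r-2).toNat : Nat) : Int) % pvMOD := by
  unfold pvG; rw [if_neg (by omega)]

theorem pvG_zero (n l r : Int) (h : n ≤ 0 ∨ l ≤ 0 ∨ r ≤ 0) : pvG n l r = 0 := by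
  unfold pvG; rw [if_pos h]

theorem pvG_symm (n l r : Int) : pvG n l r = pvG n r l := by
  unfold pvG
  by_cases hg : n ≤ 0 ∨ l ≤ 0 ∨ r ≤ 0
  · rw [if_pos hg, if_pos (by omega)]
  rw [if_neg hg, if_neg (by omega)]
  have e1 : (l + r - 2) = (r + l - 2) := by ring
  rw [e1]
  have hle : (l-1).toNat ≤ (r + l - 2).toNat := by omega
  have e2 : (r + l - 2).toNat - (l-1).toNat = (r-1).toNat := by omega
  rw [← Nat.choose_symm hle, e2]

theorem pvG_one (l r : Int) (hl : 1 ≤ l) (hr : 1 ≤ r) (hne : ¬(l = 1 ∧ r = 1)) :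
    pvG 1 l r = 0 := by
  rw [pvG_eval 1 l r le_rfl hl hr]
  obtain ⟨t, ht⟩ : ∃ t : Nat, (l + r - 2).toNat = t + 1 := ⟨(l + r - 3).toNat, by omega⟩
  rw [ht]
  have e : ((1:Int) - 1).toNat = 0 := by omega
  rw [e]
  simp [pvStir]

theorem pvId00 (m : Nat) : Nat.choose 0 0 * pvStir (m+1) 0
    = (Nat.choose 0 0 * pvStir m 0) * m := by
  cases m <;> simp [pvStir]

theorem pvG_rec (n l r : Int) (hn : 2 ≤ n) (hl : 1 ≤ l) (hr : 1 ≤ r) :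
    pvG n l r = (pvG (n-1) l r * (n-2) + pvG (n-1) (l-1) r + pvG (n-1) l (r-1)) % pvMOD := by
  obtain ⟨m, rfl⟩ : ∃ m : Nat, n = (m:Int) + 2 := ⟨(n-2).toNat, by omega⟩
  obtain ⟨a, ha⟩ : ∃ a : Nat, l = (a:Int) + 1 := ⟨(l-1).toNat, by omega⟩
  obtain ⟨b, hb⟩ : ∃ b : Nat, r = (b:Int) + 1 := ⟨(r-1).toNat, by omega⟩
  subst ha hb
  have ew : ((m:Int) + 2 - 2) = (m:Int) := by ring
  rw [ew]
  unfold pvG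
  have eK : (((a:Int)+1)+((b:Int)+1)-2).toNat = a+b := by omega
  have eK2 : (((a:Int)+1-1)+((b:Int)+1)-2).toNat = a+b-1 := by omega
  have eK3 : (((a:Int)+1)+((b:Int)+1-1)-2).toNat = a+b-1 := by omega
  have eA : ((a:Int)+1-1).toNat = a := by omega
  have eA2 : ((a:Int)+1-1-1).toNat = a-1 := by omega
  have eN : ((m:Int)+2-1).toNat = m+1 := by omega
  have eN1 : ((m:Int)+2-1-1).toNat = m := by omega
  rw [if_neg (by omega), if_neg (by omega)]
  rw [eK, eA, eN1]
  rw [show ((m:Int)+2-1).toNat = m+1 from eN]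
  split_ifs with h2 h3 h3
  · -- a = 0 and b = 0
    have ha0 : a = 0 := by omega
    have hb0 : b = 0 := by omega
    subst ha0 hb0
    rw [add_zero, add_zero]
    rw [show ((Nat.choose (0+0) 0 * pvStir (m+1) (0+0) : Nat) : Int)
        = ((Nat.choose (0+0) 0 * pvStir m (0+0) : Nat) : Int) * (m:Int) + 0 + 0 by
      rw [add_zero, add_zero]; exact_mod_cast pvId00 m]
    exact (pvmod_comb _ _ _ _ _ _ _ (pvmod_self _) (Int.ModEq.refl 0) (Int.ModEq.refl 0)).symm
  · -- a = 0, b ≥ 1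
    have ha0 : a = 0 := by omega
    obtain ⟨c, rfl⟩ : ∃ c, b = c + 1 := ⟨b - 1, by omega⟩
    subst ha0
    rw [eK3]
    rw [show (0:Nat)+(c+1)-1 = c from by omega, show (0:Nat)+(c+1) = c+1 from by omega]
    rw [show ((Nat.choose (c+1) 0 * pvStir (m+1) (c+1) : Nat) : Int)
        = ((Nat.choose (c+1) 0 * pvStir m (c+1) : Nat) : Int) * (m:Int) + 0
          + ((Nat.choose c 0 * pvStir m c : Nat) : Int) by
      rw [add_zero]
      exact_mod_cast pvId0b m c]
    exact (pvmod_comb _ _ _ _ _ _ _ (pvmod_self _) (Int.ModEq.refl 0) (pvmod_self _)).symm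
  · -- a ≥ 1, b = 0
    have hb0 : b = 0 := by omega
    obtain ⟨d, rfl⟩ : ∃ d, a = d + 1 := ⟨a - 1, by omega⟩
    subst hb0
    rw [eK2, eA2]
    rw [show d+1+0-1 = d from by omega, show d+1+0 = d+1 from rfl]
    rw [show ((Nat.choose (d+1) (d+1) * pvStir (m+1) (d+1) : Nat) : Int)
        = ((Nat.choose (d+1) (d+1) * pvStir m (d+1) : Nat) : Int) * (m:Int)
          + ((Nat.choose d d * pvStir m d : Nat) : Int) + 0 by
      rw [add_zero]
      exact_mod_cast pvIda0 m d]
    exact (pvmod_comb _ _ _ _ _ _ _ (pvmod_self _) (pvmod_self _) (Int.ModEq.refl 0)).symm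
  · -- a ≥ 1, b ≥ 1
    obtain ⟨d, rfl⟩ : ∃ d, a = d + 1 := ⟨a - 1, by omega⟩
    obtain ⟨c, rfl⟩ : ∃ c, b = c + 1 := ⟨b - 1, by omega⟩
    rw [eK2, eK3, eA2]
    rw [show d+1+(c+1)-1 = d+c+1 from by omega, show d+1-1 = d from rfl,
       show d+1+(c+1) = d+c+2 from by omega]
    rw [show ((Nat.choose (d+c+2) (d+1) * pvStir (m+1) (d+c+2) : Nat) : Int)
        = ((Nat.choose (d+c+2) (d+1) * pvStir m (d+c+2) : Nat) : Int) * (m:Int)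
          + ((Nat.choose (d+c+1) d * pvStir m (d+c+1) : Nat) : Int)
          + ((Nat.choose (d+c+1) (d+1) * pvStir m (d+c+1) : Nat) : Int) by
      exact_mod_cast pvIdab m d c]
    exact (pvmod_comb _ _ _ _ _ _ _ (pvmod_self _) (pvmod_self _) (pvmod_self _)).symm

theorem pvF_seed : pvF 1 1 1 = 1 := by
  rw [pvF, dif_neg (by omega : ¬((1:Int) ≤ 0 ∨ (1:Int) ≤ 0 ∨ (1:Int) ≤ 0)),
    if_pos ⟨rfl, rfl, rfl⟩]

theorem pvF_eq_pvG : ∀ (n l r : Int), pvF n l r = pvG n l r := by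
  have main : ∀ (m : Nat) (n l r : Int), n.toNat = m → pvF n l r = pvG n l r := by
    intro m
    induction m with
    | zero =>
      intro n l r hm
      have hn : n ≤ 0 := by omega
      rw [pvF_guard n l r (Or.inl hn), pvG_zero n l r (Or.inl hn)]
    | succ m ih =>
      intro n l r hm
      by_cases hg : n ≤ 0 ∨ l ≤ 0 ∨ r ≤ 0
      · rw [pvF_guard n l r hg, pvG_zero n l r hg]
      have hn1 : 1 ≤ n := by omega
      have hl : 1 ≤ l := by omega
      have hr : 1 ≤ r := by omega
      by_cases hs : n = 1 ∧ l = 1 ∧ r = 1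
      · obtain ⟨rfl, rfl, rfl⟩ := hs
        rw [pvF_seed, pvG_eval 1 1 1 le_rfl le_rfl le_rfl]
        norm_num [pvStir, pvMOD]
      rw [pvF, dif_neg (by omega : ¬(n ≤ 0 ∨ l ≤ 0 ∨ r ≤ 0)), if_neg hs]
      have ih1 : pvF (n-1) l r = pvG (n-1) l r := ih _ _ _ (by omega)
      have ih2 : pvF (n-1) (l-1) r = pvG (n-1) (l-1) r := ih _ _ _ (by omega)
      have ih3 : pvF (n-1) l (r-1) = pvG (n-1) l (r-1) := ih _ _ _ (by omega)
      by_cases h1 : n = 1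
      · subst h1
        rw [ih1, ih2, ih3, pvG_one l r hl hr (by tauto),
          pvG_zero _ _ _ (Or.inl (by omega)), pvG_zero _ _ _ (Or.inl (by omega)),
          pvG_zero _ _ _ (Or.inl (by omega))]
        split_ifs <;> (rw [pvmod_eq]; norm_num)
      · have hn2 : 2 ≤ n := by omega
        rw [pvG_rec n l r hn2 hl hr]
        by_cases hlr : l = r
        · subst hlr
          rw [if_pos rfl, ih1, ih2, pvmod_eq,
            show pvG (n-1) l (l-1) = pvG (n-1) (l-1) l from pvG_symm _ _ _]
          congr 1; ring
        · rw [if_neg hlr, ih1, ih2, ih3, pvmod_eq]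
  intro n l r; exact main n.toNat n l r rfl

theorem pvRead3_rep (x y z : Nat) (n l r : Int) :
    pvRead3 (List.replicate x (List.replicate y (List.replicate z (-1 : Int)))) n l r = -1 := by
  unfold pvRead3
  have ez : ∀ w : Nat, (List.replicate w (-1:Int)).getD r.toNat (-1) = -1 := by
    intro w
    by_cases h : r.toNat < w
    · rw [List.getD_eq_getElem?_getD, List.getElem?_replicate, if_pos h, Option.getD_some]
    · rw [List.getD_eq_getElem?_getD, List.getElem?_replicate, if_neg h, Option.getD_none]
  have enil : ([] : List Int).getD r.toNat (-1) = -1 := by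
    rw [List.getD_eq_getElem?_getD]; simp
  by_cases h1 : n.toNat < x
  · have e1 : (List.replicate x (List.replicate y (List.replicate z (-1:Int)))).getD n.toNat []
        = List.replicate y (List.replicate z (-1:Int)) := by
      rw [List.getD_eq_getElem?_getD, List.getElem?_replicate, if_pos h1, Option.getD_some]
    rw [e1]
    by_cases h2 : l.toNat < y
    · have e2 : (List.replicate y (List.replicate z (-1:Int))).getD l.toNat []
          = List.replicate z (-1:Int) := by
        rw [List.getD_eq_getElem?_getD, List.getElem?_replicate, if_pos h2, Option.getD_some]
      rw [e2, ez]
    · have e2 : (List.replicate y (List.replicate z (-1:Int))).getD l.toNat [] = [] := by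
        rw [List.getD_eq_getElem?_getD, List.getElem?_replicate, if_neg h2, Option.getD_none]
      rw [e2, enil]
  · have e1 : (List.replicate x (List.replicate y (List.replicate z (-1:Int)))).getD n.toNat []
        = [] := by
      rw [List.getD_eq_getElem?_getD, List.getElem?_replicate, if_neg h1, Option.getD_none]
    rw [e1]
    have e2 : ([] : List (List Int)).getD l.toNat [] = [] := by
      rw [List.getD_eq_getElem?_getD]; simp
    rw [e2, enil]

theorem pvGood_init (N M1 M2 : Int) (hN : 1 ≤ N) (h1 : 1 ≤ M1) (h2 : 1 ≤ M2) :
    pvGood (pvWrite3 (List.replicate (N+1).toNat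
      (List.replicate (M1+1).toNat (List.replicate (M2+1).toNat (-1:Int)))) 1 1 1 1) := by
  constructor
  · unfold pvRead3 pvWrite3
    have hrow : (List.replicate (N+1).toNat
        (List.replicate (M1+1).toNat (List.replicate (M2+1).toNat (-1:Int)))).getD
        (1:Int).toNat [] = List.replicate (M1+1).toNat (List.replicate (M2+1).toNat (-1:Int)) := by
      rw [List.getD_eq_getElem?_getD, List.getElem?_replicate, if_pos (by omega), Option.getD_some]
    have hcol : (List.replicate (M1+1).toNat (List.replicate (M2+1).toNat (-1:Int))).getD
        (1:Int).toNat [] = List.replicate (M2+1).toNat (-1:Int) := by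
      rw [List.getD_eq_getElem?_getD, List.getElem?_replicate, if_pos (by omega), Option.getD_some]
    rw [hrow, hcol, pvGetDSet, if_pos ⟨rfl, by simp; omega⟩,
      pvGetDSet, if_pos ⟨rfl, by simp; omega⟩,
      pvGetDSet, if_pos ⟨rfl, by simp; omega⟩]
  · intro n l r hge
    rcases pvRead3_write _ 1 1 1 1 n l r with h | ⟨e1, e2, e3, hval⟩
    · rw [h, pvRead3_rep] at hge
      exact absurd hge (by norm_num)
    · have en : n = 1 := by omega
      have el : l = 1 := by omega
      have er : r = 1 := by omega
      subst en el er
      rw [hval]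
      exact pvF_seed.symm

theorem solve3_eq_pvG (N L R : Int) (hN : 1 ≤ N) (hL : 1 ≤ L) (hR : 1 ≤ R) :
    solve3 N L R = pvG N L R := by
  by_cases h : L > R
  · have e : solve3 N L R = (solve3Loop (N.toNat + 1) N R L
        (pvWrite3 (List.replicate (N+1).toNat (List.replicate (R+1).toNat
          (List.replicate (L+1).toNat (-1:Int)))) 1 1 1 1)).1 := by
      unfold solve3; rw [if_pos h]
    rw [e, (pvLoop_correct _ N R L _ (pvGood_init N R L hN hR hL) (by push_cast; omega)).1,
      pvF_eq_pvG, pvG_symm]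
  · have e : solve3 N L R = (solve3Loop (N.toNat + 1) N L R
        (pvWrite3 (List.replicate (N+1).toNat (List.replicate (L+1).toNat
          (List.replicate (R+1).toNat (-1:Int)))) 1 1 1 1)).1 := by
      unfold solve3; rw [if_neg h]
    rw [e, (pvLoop_correct _ N L R _ (pvGood_init N L R hN hL hR) (by push_cast; omega)).1,
      pvF_eq_pvG]

def pvRowN (t k : Nat) : List Int :=
  (List.range (k+1)).map (fun j => ((pvStir t j : Nat) : Int) % pvMOD)

theorem pvRow0 (k : Nat) : (1 : Int) :: List.replicate k (0:Int) = pvRowN 0 k := by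
  unfold pvRowN
  rw [List.range_succ_eq_map, List.map_cons, List.map_map]
  have h0 : ((pvStir 0 0 : Nat) : Int) % pvMOD = 1 := by norm_num [pvStir, pvMOD]
  rw [h0]
  congr 1
  have : ∀ j : Nat, (((pvStir 0 (Nat.succ j) : Nat) : Int) % pvMOD) = 0 := by
    intro j; norm_num [pvStir]
  calc List.replicate k (0:Int) = (List.range k).map (fun _ => (0:Int)) := by
        rw [List.map_const']; congr 1; simp
    _ = (List.range k).map ((fun j => ((pvStir 0 j : Nat) : Int) % pvMOD) ∘ Nat.succ) := by
        apply List.map_congr_left; intro j _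
        simp only [Function.comp]
        rw [this j]

theorem pvStir_lt : ∀ (m k : Nat), m < k → pvStir m k = 0 := by
  intro m
  induction m with
  | zero =>
    intro k hk
    obtain ⟨k', rfl⟩ : ∃ k', k = k' + 1 := ⟨k - 1, by omega⟩
    rfl
  | succ m ih =>
    intro k hk
    obtain ⟨k', rfl⟩ : ∃ k', k = k' + 1 := ⟨k - 1, by omega⟩
    have e : pvStir (m+1) (k'+1) = pvStir m k' + m * pvStir m (k'+1) := rfl
    rw [e, ih k' (by omega), ih (k'+1) (by omega)]
    simp

theorem pvZipAdj (f : Int → Int → Int) (g : Nat → Int) :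
    ∀ (c j0 : Nat), List.zipWith f (g j0 :: (List.range c).map (fun j => g (j0 + j + 1)))
      ((List.range c).map (fun j => g (j0 + j + 1)))
      = (List.range c).map (fun j => f (g (j0 + j)) (g (j0 + j + 1))) := by
  intro c
  induction c with
  | zero => intro j0; simp
  | succ c ih =>
    intro j0
    rw [List.range_succ_eq_map, List.map_cons, List.map_cons,
      List.zipWith_cons_cons, List.map_map, List.map_map]
    simp only [Nat.add_zero]
    rw [show ((fun j => g (j0 + j + 1)) ∘ Nat.succ) = fun j => g ((j0+1) + j + 1) from
      funext fun j => congrArg g (by omega)]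
    rw [ih (j0+1)]
    congr 1
    apply List.map_congr_left
    intro j _
    simp only [Function.comp]
    rw [show j0 + 1 + j = j0 + j.succ from by omega]

theorem pvStep_row (s k : Nat) :
    (0:Int) :: List.zipWith
      (fun p x => PySem.Int.mod (p + (((1:Int) + (s:Int)) - 1) * x) pvMOD)
      (pvRowN s k) (pvRowN s k).tail = pvRowN (s+1) k := by
  have hrow : pvRowN s k = ((pvStir s 0 : Nat) : Int) % pvMOD ::
      (List.range k).map (fun j => ((pvStir s (0 + j + 1) : Nat) : Int) % pvMOD) := by
    unfold pvRowN
    rw [List.range_succ_eq_map, List.map_cons, List.map_map]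
    congr 1
    apply List.map_congr_left
    intro j _
    simp only [Function.comp]
    congr 3
    omega
  rw [hrow]
  simp only [List.tail_cons]
  rw [pvZipAdj (fun p x => PySem.Int.mod (p + (((1:Int) + (s:Int)) - 1) * x) pvMOD)
    (fun j => ((pvStir s j : Nat) : Int) % pvMOD) k 0]
  unfold pvRowN
  rw [List.range_succ_eq_map, List.map_cons, List.map_map]
  congr 1
  apply List.map_congr_left
  intro j _
  simp only [Function.comp, Nat.succ_eq_add_one]
  rw [pvmod_eq]
  rw [show (0:Nat) + j = j from by omega]
  have hstir : pvStir (s+1) (j+1) = pvStir s j + s * pvStir s (j+1) := rfl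
  rw [hstir]
  have ew : ((1:Int) + (s:Int) - 1) = (s:Int) := by ring
  rw [ew]
  have hcast : ((pvStir s j + s * pvStir s (j+1) : Nat) : Int)
      = ((pvStir s j : Nat) : Int) + (s:Int) * ((pvStir s (j+1) : Nat) : Int) := by
    push_cast; ring
  rw [hcast]
  exact ((pvmod_self _).add ((pvmod_self _).mul_left (s:Int)))

theorem pvFold_rows (k : Nat) (N : Int) :
    (PySem.List.pyRange 1 N 1).foldl
      (fun row m => (0:Int) ::
        List.zipWith (fun p x => PySem.Int.mod (p + (m - 1) * x) pvMOD) row row.tail)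
      ((1:Int) :: List.replicate k (0:Int)) = pvRowN (N-1).toNat k := by
  rw [PySem.List.pyRange_one, List.foldl_map]
  generalize (N - 1).toNat = s
  induction s with
  | zero => simp [pvRow0]
  | succ s ih =>
    rw [List.range_succ, List.foldl_append, ih]
    simp only [List.foldl_cons, List.foldl_nil]
    exact pvStep_row s k

theorem pvRowN_getD (t k : Nat) :
    PySem.List.pyGetD (pvRowN t k) ((k : Nat) : Int) 0 = ((pvStir t k : Nat) : Int) % pvMOD := by
  rw [PySem.List.pyGetD_natCast]
  unfold pvRowN
  rw [List.getD_eq_getElem?_getD]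
  simp

theorem pvBinom (k' : Nat) : ∀ (t : Nat), t ≤ k' →
    (PySem.List.pyRange 0 (t:Int) 1).foldl
      (fun c i => PySem.Int.floordiv (c * ((k':Int) - i)) (i+1)) 1 = (k'.choose t : Int) := by
  intro t
  induction t with
  | zero => intro _; rw [show ((0:Nat):Int) = 0 from rfl, PySem.List.pyRange_one_eq_nil le_rfl]; simp
  | succ t ih =>
    intro ht
    have e : ((t+1:Nat) : Int) = (t:Int) + 1 := by push_cast; ring
    rw [e, PySem.List.pyRange_one_succ_right (by omega : (0:Int) ≤ (t:Int)), List.foldl_append,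
      ih (by omega)]
    simp only [List.foldl_cons, List.foldl_nil]
    have e2 : ((k':Int) - (t:Int)) = ((k' - t : Nat) : Int) := by omega
    rw [e2]
    have e3 : (k'.choose t : Int) * ((k' - t : Nat) : Int)
        = ((k'.choose (t+1) * (t+1) : Nat) : Int) := by
      rw [Nat.choose_succ_right_eq]; push_cast; ring
    rw [e3, PySem.Int.floordiv_eq_ediv_of_pos (by omega : (0:Int) < (t:Int)+1)]
    have e4 : ((k'.choose (t+1) * (t+1) : Nat) : Int) = (k'.choose (t+1) : Int) * ((t:Int)+1) := by
      push_cast; ring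
    rw [e4, Int.mul_ediv_cancel _ (by omega : ((t:Int)+1) ≠ 0)]

theorem pvChooseMin (a b : Nat) : Nat.choose (a+b) (min a b) = Nat.choose (a+b) a := by
  rcases le_total a b with h | h
  · rw [min_eq_left h]
  · rw [min_eq_right h]
    have h2 := Nat.choose_symm (show a ≤ a+b by omega)
    rwa [show a+b-a = b from by omega] at h2

theorem solve3_alt_eq_pvG (N L R : Int) (hN : 1 ≤ N) (hL : 1 ≤ L) (hR : 1 ≤ R) :
    solve3_alt N L R = pvG N L R := by
  obtain ⟨a, rfl⟩ : ∃ a : Nat, L = (a:Int) + 1 := ⟨(L-1).toNat, by omega⟩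
  obtain ⟨b, rfl⟩ : ∃ b : Nat, R = (b:Int) + 1 := ⟨(R-1).toNat, by omega⟩
  have ebody : solve3_alt N ((a:Int)+1) ((b:Int)+1) =
      if ((a:Int)+1+((b:Int)+1)-2) > N - 1 then 0 else
      PySem.Int.mod
        (PySem.Int.mod
          ((PySem.List.pyRange 0 (min ((a:Int)+1-1) ((b:Int)+1-1)) 1).foldl
            (fun c i => PySem.Int.floordiv (c * (((a:Int)+1+((b:Int)+1)-2) - i)) (i+1)) 1)
          pvMOD *
         PySem.List.pyGetD
          ((PySem.List.pyRange 1 N 1).foldl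
            (fun row m => (0:Int) ::
              List.zipWith (fun p x => PySem.Int.mod (p + (m - 1) * x) pvMOD) row row.tail)
            ((1:Int) :: List.replicate ((a:Int)+1+((b:Int)+1)-2).toNat (0:Int)))
          ((a:Int)+1+((b:Int)+1)-2) 0)
        pvMOD := rfl
  rw [ebody]
  rw [show ((a:Int)+1+((b:Int)+1)-2) = ((a+b : Nat) : Int) from by push_cast; ring]
  by_cases hk : ((a+b : Nat) : Int) > N - 1
  · rw [if_pos hk, pvG_eval N _ _ hN (by omega) (by omega)]
    rw [show (((a:Int)+1)+((b:Int)+1)-2).toNat = a+b from by omega]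
    rw [pvStir_lt (N-1).toNat (a+b) (by omega)]
    simp
  · rw [if_neg hk]
    rw [show (min ((a:Int)+1-1) ((b:Int)+1-1)) = ((min a b : Nat) : Int) from by omega]
    rw [Int.toNat_natCast]
    rw [pvFold_rows (a+b) N, pvRowN_getD, pvBinom (a+b) (min a b) (by omega)]
    rw [pvG_eval N _ _ hN (by omega) (by omega)]
    rw [show (((a:Int)+1)+((b:Int)+1)-2).toNat = a+b from by omega,
       show ((a:Int)+1-1).toNat = a from by omega]
    rw [pvmod_eq, pvmod_eq]
    have h1 : ((((Nat.choose (a+b) (min a b) : Nat) : Int) % pvMOD) *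
        (((pvStir (N-1).toNat (a+b) : Nat) : Int) % pvMOD)) % pvMOD
        = (((Nat.choose (a+b) (min a b) : Nat) : Int) *
          ((pvStir (N-1).toNat (a+b) : Nat) : Int)) % pvMOD :=
      (pvmod_self _).mul (pvmod_self _)
    rw [h1, pvChooseMin a b]
    congr 1

-- ===== VERDICT (by name: the statement is the Claim_ definition above) =====
theorem solve3_spec : Claim_equal_solve3 := by
  intro N L R _ hP
  unfold Spec_solve3
  obtain ⟨hN, hL, hR⟩ := hP
  rw [solve3_eq_pvG N L R hN hL hR, solve3_alt_eq_pvG N L R hN hL hR]
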